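-- pv_equiv track=rewrite | github.com/Atromight/neetcode-submissions | Data Structures & Algorithms/minimum-window-with-characters/submission-3.py | are_counts_at_least_equal
-- ===== SOURCE A (Python) =====
-- def are_counts_at_least_equal(
--
--     cnt1: dict,
--     cnt2: dict
-- ) -> bool:
--     for letter in cnt1:
--         if cnt2.get(letter, 0) < cnt1[letter]:
--             return False
--
--     return True
-- ===== SOURCE B (Python) =====
-- def are_counts_at_least_equal(
--     cnt1: dict,
--     cnt2: dict
-- ) -> bool:
--     need = dict(cnt1)
--     for letter, count in cnt2.items():
--         if letter in need:
--             need[letter] -= count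
--     return max(need.values(), default=0) <= 0
-- ===== Notes on version B (the rewrite author's own statement) =====
-- stated objective: alternative
-- what changed: B consumes the supply: it copies cnt1 into a need-dict, folds cnt2 over it subtracting each supplied count (need[k] -= c), and decides by the reduction max(need.values(), default=0) <= 0 — A's early-return per-key comparison loop over cnt1 disappears.
import Mathlib
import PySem

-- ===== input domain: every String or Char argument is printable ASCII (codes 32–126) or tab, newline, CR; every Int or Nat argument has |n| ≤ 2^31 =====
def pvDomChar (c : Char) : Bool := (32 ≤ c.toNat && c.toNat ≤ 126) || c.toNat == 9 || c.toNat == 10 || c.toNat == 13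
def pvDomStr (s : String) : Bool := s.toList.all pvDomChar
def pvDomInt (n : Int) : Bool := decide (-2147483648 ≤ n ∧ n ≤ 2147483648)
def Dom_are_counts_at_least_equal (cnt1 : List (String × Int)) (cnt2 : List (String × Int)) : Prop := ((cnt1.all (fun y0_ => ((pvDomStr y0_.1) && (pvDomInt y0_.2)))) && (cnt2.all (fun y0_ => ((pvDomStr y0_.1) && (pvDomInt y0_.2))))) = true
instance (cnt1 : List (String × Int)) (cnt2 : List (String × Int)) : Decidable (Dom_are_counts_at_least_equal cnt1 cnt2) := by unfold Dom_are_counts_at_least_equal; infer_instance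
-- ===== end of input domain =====

-- B subtracts cnt2's supply from a need-dict copied from cnt1 and tests max(need.values(), default=0) <= 0,
-- instead of A's early-return per-key comparison loop (alternative decomposition, same cost).

-- ===== PORT A =====
-- A's 'for letter in cnt1' early-return loop; cnt1[letter] always succeeds (letter is a key of cnt1),
-- so it is ported as getD with default 0
def areLoopA (d1 : PySem.Dict String Int) (d2 : PySem.Dict String Int) : List String → Bool
  | [] => true
  | k :: ks => if d2.getD k 0 < d1.getD k 0 then false else areLoopA d1 d2 ks

def are_counts_at_least_equal (cnt1 : List (String × Int)) (cnt2 : List (String × Int)) : Bool :=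
  let d1 := PySem.Dict.ofList cnt1
  let d2 := PySem.Dict.ofList cnt2
  areLoopA d1 d2 d1.keys

-- ===== PORT B =====
-- one iteration of Source B's 'for letter, count in cnt2.items(): if letter in need: need[letter] -= count'
def needStep (nd : PySem.Dict String Int) (p : String × Int) : PySem.Dict String Int :=
  if nd.contains p.1 then nd.modify p.1 0 (fun v => v - p.2) else nd

def are_counts_at_least_equal_alt (cnt1 : List (String × Int)) (cnt2 : List (String × Int)) : Bool :=
  let d1 := PySem.Dict.ofList cnt1
  let d2 := PySem.Dict.ofList cnt2
  let need := d2.items.foldl needStep d1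
  decide (PySem.List.maxD need.values (fun v => v) 0 ≤ 0)

-- ===== PRECONDITION & SPEC =====
def Spec_are_counts_at_least_equal (cnt1 : List (String × Int)) (cnt2 : List (String × Int)) (out : Bool) : Prop := out = are_counts_at_least_equal_alt cnt1 cnt2
instance (cnt1 : List (String × Int)) (cnt2 : List (String × Int)) (out : Bool) : Decidable (Spec_are_counts_at_least_equal cnt1 cnt2 out) := by unfold Spec_are_counts_at_least_equal; infer_instance

-- ===== CLAIM (what is proved, stated in full; the proofs are below) =====
def Claim_equal_are_counts_at_least_equal : Prop := ∀ (cnt1 : List (String × Int)) (cnt2 : List (String × Int)), Dom_are_counts_at_least_equal cnt1 cnt2 → Spec_are_counts_at_least_equal cnt1 cnt2 (are_counts_at_least_equal cnt1 cnt2)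

-- ===== LEMMAS AND PROOFS =====

-- the fold of needStep never changes the key set
theorem keys_foldl_needStep (l : List (String × Int)) (nd : PySem.Dict String Int) :
    (l.foldl needStep nd).keys = nd.keys := by
  induction l generalizing nd with
  | nil => rfl
  | cons p l ih =>
    simp only [List.foldl_cons]
    rw [ih]
    unfold needStep
    by_cases hc : nd.contains p.1 = true
    · simp only [hc, if_true]
      rw [PySem.Dict.keys_modify, PySem.Dict.keys_insert_of_contains]
      exact hc
    · simp [hc]

-- value at a present key after the fold: original minus what cnt2 supplied for that key
theorem getD_foldl_needStep (l : List (String × Int)) (nd : PySem.Dict String Int) (k : String)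
    (h : nd.contains k = true) :
    (l.foldl needStep nd).getD k 0 =
      nd.getD k 0 - ((l.filter (fun p => p.1 == k)).map Prod.snd).sum := by
  induction l generalizing nd with
  | nil => simp
  | cons p l ih =>
    simp only [List.foldl_cons, List.filter_cons]
    by_cases hk : p.1 = k
    · subst hk
      have hc : nd.contains p.1 = true := h
      simp only [needStep, hc, if_true, beq_self_eq_true, if_true, List.map_cons, List.sum_cons]
      rw [ih _ (by rw [PySem.Dict.contains_modify]; simp)]
      rw [PySem.Dict.getD_modify]
      simp only [reduceIte]
      ring
    · have hbeq : (p.1 == k) = false := by simp [hk]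
      simp only [hbeq, Bool.false_eq_true, if_false]
      by_cases hc : nd.contains p.1 = true
      · simp only [needStep, hc, if_true]
        rw [ih _ (by rw [PySem.Dict.contains_modify]; simp [h])]
        rw [PySem.Dict.getD_modify]
        simp [Ne.symm hk]
      · simp only [needStep, hc]
        simp only [Bool.false_eq_true, if_false]
        exact ih nd h

theorem filter_beq_of_nodup (l : List String) (k : String) (h : l.Nodup) :
    l.filter (fun x => x == k) = if k ∈ l then [k] else [] := by
  induction l with
  | nil => simp
  | cons a l ih =>
    simp only [List.filter_cons, List.mem_cons]
    rcases List.nodup_cons.mp h with ⟨ha, hl⟩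
    by_cases hk : a = k
    · subst hk
      simp [ih hl, ha]
    · have : (a == k) = false := by simp [hk]
      simp [this, ih hl, Ne.symm hk]

-- the total count cnt2 supplies for key k is d2.getD k 0
theorem sum_filter_items (d : PySem.Dict String Int) (h : d.keys.Nodup) (k : String) :
    ((d.items.filter (fun p => p.1 == k)).map Prod.snd).sum = d.getD k 0 := by
  rw [PySem.Dict.items_eq_map_keys d h 0, List.filter_map]
  have hcomp : ((fun p : String × Int => p.1 == k) ∘ (fun k' => (k', d.getD k' 0))) = (fun x => x == k) := rfl
  rw [hcomp, filter_beq_of_nodup _ _ h]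
  by_cases hm : k ∈ d.keys
  · simp [hm]
  · have hc : d.contains k = false := by
      rw [PySem.Dict.contains_eq_decide_mem_keys]; simp [hm]
    simp [hm, PySem.Dict.getD_of_not_contains d 0 hc]

-- A's early-return loop is the pointwise comparison over the listed keys
theorem areLoopA_eq_all (d1 d2 : PySem.Dict String Int) (ks : List String) :
    areLoopA d1 d2 ks = ks.all (fun k => decide (d1.getD k 0 ≤ d2.getD k 0)) := by
  induction ks with
  | nil => rfl
  | cons k ks ih =>
    by_cases h : d2.getD k 0 < d1.getD k 0
    · simp [areLoopA, h, List.all_cons]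
    · have hd : decide (d1.getD k 0 ≤ d2.getD k 0) = true := by
        simp only [decide_eq_true_eq]; omega
      simp only [areLoopA, if_neg h, List.all_cons, ih, hd, Bool.true_and]

-- B's reduction: the max with default 0 is ≤ 0 iff every value is ≤ 0
theorem maxD_le_zero_iff (xs : List Int) :
    (PySem.List.maxD xs (fun v => v) 0 ≤ 0) ↔ ∀ v ∈ xs, v ≤ 0 := by
  cases hx : PySem.List.max? xs (fun v => v) with
  | none =>
    have hxe := (PySem.List.max?_eq_none_iff xs _).mp hx
    subst hxe
    simp only [PySem.List.maxD, hx, Option.getD_none]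
    simp
  | some m =>
    simp only [PySem.List.maxD, hx, Option.getD_some]
    constructor
    · intro hm v hv
      exact le_trans (PySem.List.max?_isMax hx v hv) hm
    · intro hall
      exact hall m (PySem.List.max?_mem hx)

-- ===== VERDICT (by name: the statement is the Claim_ definition above) =====
theorem are_counts_at_least_equal_spec : Claim_equal_are_counts_at_least_equal := by
  intro cnt1 cnt2 _
  unfold Spec_are_counts_at_least_equal are_counts_at_least_equal are_counts_at_least_equal_alt
  dsimp only
  set d1 := PySem.Dict.ofList cnt1 with hd1
  set d2 := PySem.Dict.ofList cnt2 with hd2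
  set need := d2.items.foldl needStep d1 with hneed
  have hnd1 : d1.keys.Nodup := PySem.Dict.nodup_keys_ofList cnt1
  have hnd2 : d2.keys.Nodup := PySem.Dict.nodup_keys_ofList cnt2
  have hkeys : need.keys = d1.keys := keys_foldl_needStep _ _
  have hval : ∀ k ∈ d1.keys, need.getD k 0 = d1.getD k 0 - d2.getD k 0 := by
    intro k hk
    have hc : d1.contains k = true := by
      rw [PySem.Dict.contains_eq_decide_mem_keys]; simp [hk]
    rw [hneed, getD_foldl_needStep _ _ _ hc, sum_filter_items d2 hnd2 k]
  have hvalues : need.values = d1.keys.map (fun k => need.getD k 0) := by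
    rw [PySem.Dict.values_eq_map_keys need (hkeys ▸ hnd1) 0, hkeys]
  rw [areLoopA_eq_all, Bool.eq_iff_iff]
  simp only [List.all_eq_true, decide_eq_true_eq, maxD_le_zero_iff, hvalues, List.mem_map]
  constructor
  · rintro h v ⟨k, hk, rfl⟩
    rw [hval k hk]
    have := h k hk
    omega
  · intro h k hk
    have := h (need.getD k 0) ⟨k, hk, rfl⟩
    rw [hval k hk] at this
    omega
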